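-- pv_equiv track=rewrite | github.com/anmol-dash/te-scraper-and-analysis | query.py | _search_single_chrom
-- ===== SOURCE A (Python) =====
-- def _search_single_chrom(primer, rc, plen, chrom, seq, max_hits=0, current_count=0):
--     """Search a single chromosome for primer hits.
--     Returns (hits_list, total_count). Stops early if max_hits exceeded.
--     """
--     hits = []
--     count = current_count
--     seq = seq.upper()
--     # forward
--     idx = seq.find(primer)
--     while idx != -1:
--         hits.append((chrom, idx+1, idx+plen, "+"))
--         count += 1
--         if max_hits and count >= max_hits:
--             return hits, count
--         idx = seq.find(primer, idx+1)
--     # reverse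
--     idx = seq.find(rc)
--     while idx != -1:
--         hits.append((chrom, idx+1, idx+plen, "-"))
--         count += 1
--         if max_hits and count >= max_hits:
--             return hits, count
--         idx = seq.find(rc, idx+1)
--     return hits, count
-- ===== SOURCE B (Python) =====
-- def _search_single_chrom(primer, rc, plen, chrom, seq, max_hits=0, current_count=0):
--     """Stream candidate hits (forward strand then reverse strand) from a
--     position scan, consuming them in one loop that stops once the hit
--     budget is reached."""
--     S = seq.upper()
--
--     def candidates():
--         for i in range(len(S) - len(primer) + 1):
--             if S.startswith(primer, i):
--                 yield (chrom, i + 1, i + plen, "+")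
--         for i in range(len(S) - len(rc) + 1):
--             if S.startswith(rc, i):
--                 yield (chrom, i + 1, i + plen, "-")
--
--     hits = []
--     count = current_count
--     for h in candidates():
--         hits.append(h)
--         count += 1
--         if max_hits and count >= max_hits:
--             break
--     return hits, count
-- ===== Notes on version B (the rewrite author's own statement) =====
-- stated objective: alternative
-- what changed: Replaces A's two duplicated find/while loops with early returns by a position scan (startswith at each index) that streams forward-strand then reverse-strand candidates into one consumption loop enforcing the hit budget.
import Mathlib
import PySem

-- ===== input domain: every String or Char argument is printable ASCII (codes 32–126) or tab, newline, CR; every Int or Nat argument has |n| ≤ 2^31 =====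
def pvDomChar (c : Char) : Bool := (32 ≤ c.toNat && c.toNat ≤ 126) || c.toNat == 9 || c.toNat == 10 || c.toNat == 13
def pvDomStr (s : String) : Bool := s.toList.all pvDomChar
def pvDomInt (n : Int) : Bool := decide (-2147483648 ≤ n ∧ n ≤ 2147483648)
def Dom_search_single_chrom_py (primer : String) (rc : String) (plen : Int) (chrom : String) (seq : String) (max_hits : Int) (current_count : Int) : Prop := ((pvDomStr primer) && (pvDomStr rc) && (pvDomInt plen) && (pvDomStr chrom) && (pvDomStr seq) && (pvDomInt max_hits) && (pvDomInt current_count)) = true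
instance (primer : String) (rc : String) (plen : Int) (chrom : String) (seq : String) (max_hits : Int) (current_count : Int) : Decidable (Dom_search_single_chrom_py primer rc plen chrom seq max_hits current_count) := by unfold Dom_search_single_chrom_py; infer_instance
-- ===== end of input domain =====

-- B replaces A's two duplicated find/while loops (with early returns) by a position scan
-- that streams forward-strand then reverse-strand candidates into one consumption loop
-- enforcing the hit budget (objective: alternative decomposition, same asymptotic cost).

-- ===== PORT A =====
-- A's 'while idx != -1' loop (one per strand); fuel bounds the iteration count
-- (each step strictly increases the search start, so S.length + 2 fuel is never exhausted).
def pvAWhile (S p : List Char) (chrom : String) (plen : Int) (sign : String) (mh : Int) :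
    Nat → List (String × Int × Int × String) → Int → Int →
    (List (String × Int × Int × String)) × Int × Bool
  | fuel, hits, count, idx =>
    if idx = -1 then (hits, count, false)
    else
      let hits' := hits ++ [(chrom, idx + 1, idx + plen, sign)]
      let count' := count + 1
      if mh ≠ 0 ∧ mh ≤ count' then (hits', count', true)
      else
        match fuel with
        | 0 => (hits', count', false)
        | fuel' + 1 =>
            pvAWhile S p chrom plen sign mh fuel' hits' count' (PySem.Chars.findFrom S p (idx + 1) none)

def search_single_chrom_py (primer : String) (rc : String) (plen : Int) (chrom : String) (seq : String) (max_hits : Int) (current_count : Int) : (List (String × Int × Int × String)) × Int :=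
  let S := PySem.Chars.upper seq.toList
  let r1 := pvAWhile S primer.toList chrom plen "+" max_hits (S.length + 2) [] current_count
              (PySem.Chars.find S primer.toList)
  if r1.2.2 then (r1.1, r1.2.1)
  else
    let r2 := pvAWhile S rc.toList chrom plen "-" max_hits (S.length + 2) r1.1 r1.2.1
                (PySem.Chars.find S rc.toList)
    (r2.1, r2.2.1)

-- ===== PORT B =====
-- the match positions of one strand: [i for i in range(len(S) - len(p) + 1) if S.startswith(p, i)]
-- (S.startswith(p, i) with 0 ≤ i ≤ len(S) is exactly the prefix test on S.drop i)
def pvPositions (S p : List Char) : List Int :=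
  (PySem.List.pyRange 0 ((S.length : Int) - (p.length : Int) + 1) 1).filter
    (fun i => PySem.Chars.startswith (S.drop i.toNat) p)

-- B's consumption loop: 'for h in candidates(): hits.append(h); count += 1; if max_hits and count >= max_hits: break'
def pvBLoop (mh : Int) : List (String × Int × Int × String) →
    List (String × Int × Int × String) → Int →
    (List (String × Int × Int × String)) × Int
  | [], hits, count => (hits, count)
  | h :: t, hits, count =>
    let hits' := hits ++ [h]
    let count' := count + 1
    if mh ≠ 0 ∧ mh ≤ count' then (hits', count')
    else pvBLoop mh t hits' count'

def search_single_chrom_py_alt (primer : String) (rc : String) (plen : Int) (chrom : String) (seq : String) (max_hits : Int) (current_count : Int) : (List (String × Int × Int × String)) × Int :=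
  let S := PySem.Chars.upper seq.toList
  let candidates := (pvPositions S primer.toList).map (fun i => (chrom, i + 1, i + plen, "+"))
                 ++ (pvPositions S rc.toList).map (fun i => (chrom, i + 1, i + plen, "-"))
  pvBLoop max_hits candidates [] current_count

-- ===== PRECONDITION & SPEC =====
def Spec_search_single_chrom_py (primer : String) (rc : String) (plen : Int) (chrom : String) (seq : String) (max_hits : Int) (current_count : Int) (out : (List (String × Int × Int × String)) × Int) : Prop := out = search_single_chrom_py_alt primer rc plen chrom seq max_hits current_count
instance (primer : String) (rc : String) (plen : Int) (chrom : String) (seq : String) (max_hits : Int) (current_count : Int) (out : (List (String × Int × Int × String)) × Int) : Decidable (Spec_search_single_chrom_py primer rc plen chrom seq max_hits current_count out) := by unfold Spec_search_single_chrom_py; infer_instance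

-- ===== CLAIM (what is proved, stated in full; the proofs are below) =====
def Claim_equal_search_single_chrom_py : Prop := ∀ (primer : String) (rc : String) (plen : Int) (chrom : String) (seq : String) (max_hits : Int) (current_count : Int), Dom_search_single_chrom_py primer rc plen chrom seq max_hits current_count → Spec_search_single_chrom_py primer rc plen chrom seq max_hits current_count (search_single_chrom_py primer rc plen chrom seq max_hits current_count)

-- ===== LEMMAS AND PROOFS =====

-- flagged variant of B's loop, used to relate A's two early-return loops to one run
def pvRun (mh : Int) : List (String × Int × Int × String) →
    List (String × Int × Int × String) → Int →
    (List (String × Int × Int × String)) × Int × Bool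
  | [], hits, count => (hits, count, false)
  | x :: t, hits, count =>
    let hits' := hits ++ [x]
    let count' := count + 1
    if mh ≠ 0 ∧ mh ≤ count' then (hits', count', true)
    else pvRun mh t hits' count'

lemma pvRun_append (mh : Int) (l₁ l₂ hits : List (String × Int × Int × String)) (count : Int) :
    pvRun mh (l₁ ++ l₂) hits count =
      (if (pvRun mh l₁ hits count).2.2 then pvRun mh l₁ hits count
       else pvRun mh l₂ (pvRun mh l₁ hits count).1 (pvRun mh l₁ hits count).2.1) := by
  induction l₁ generalizing hits count with
  | nil => simp [pvRun]
  | cons x t ih =>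
      simp only [List.cons_append, pvRun]
      by_cases h : mh ≠ 0 ∧ mh ≤ count + 1
      · simp [h]
      · simp only [if_neg h]
        exact ih _ _

lemma pvRun_proj (mh : Int) (l hits : List (String × Int × Int × String)) (count : Int) :
    ((pvRun mh l hits count).1, (pvRun mh l hits count).2.1) = pvBLoop mh l hits count := by
  induction l generalizing hits count with
  | nil => simp [pvRun, pvBLoop]
  | cons x t ih =>
      simp only [pvRun, pvBLoop]
      by_cases h : mh ≠ 0 ∧ mh ≤ count + 1
      · simp [h]
      · simp only [if_neg h]
        exact ih _ _

lemma mem_pvPositions {S p : List Char} {i : Int} :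
    i ∈ pvPositions S p ↔
      0 ≤ i ∧ i < (S.length : Int) - (p.length : Int) + 1 ∧
        PySem.Chars.startswith (S.drop i.toNat) p = true := by
  simp [pvPositions, List.mem_filter, PySem.List.mem_pyRange_one, and_assoc]

lemma pairwise_pvPositions (S p : List Char) : (pvPositions S p).Pairwise (· < ·) :=
  List.Pairwise.filter _ (PySem.List.pairwise_lt_pyRange_one 0 _)

lemma filter_ge_eq_cons {l : List Int} {x : Int} {k : Int}
    (hl : l.Pairwise (· < ·)) (hx : x ∈ l) (hk : k ≤ x)
    (hmin : ∀ y ∈ l, k ≤ y → x ≤ y) :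
    l.filter (fun y => decide (k ≤ y)) = x :: l.filter (fun y => decide (x + 1 ≤ y)) := by
  induction l with
  | nil => simp at hx
  | cons a t ih =>
      rcases List.pairwise_cons.mp hl with ⟨ha, ht⟩
      rcases List.mem_cons.mp hx with rfl | hxt
      · simp only [List.filter_cons, decide_eq_true_eq]
        rw [if_pos hk, if_neg (by omega : ¬ x + 1 ≤ x)]
        congr 1
        apply List.filter_congr
        intro y hy
        have := ha y hy
        rw [decide_eq_decide]
        omega
      · have hax : a < x := ha x hxt
        have hka : ¬ k ≤ a := by
          intro hka
          have := hmin a (List.mem_cons_self) hka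
          omega
        simp only [List.filter_cons, decide_eq_true_eq]
        rw [if_neg hka, if_neg (by omega : ¬ x + 1 ≤ a)]
        exact ih ht hxt (fun y hy hky => hmin y (List.mem_cons_of_mem a hy) hky)

-- findFrom from a nonnegative start k points at the head of the positions ≥ k (or -1)
lemma findFrom_pos (S p : List Char) (k : Nat) (hk : k ≤ S.length + 1) :
    PySem.Chars.findFrom S p (k : Int) none =
      ((pvPositions S p).filter (fun i => decide ((k : Int) ≤ i))).headD (-1) := by
  by_cases hkn : k ≤ S.length
  · rw [PySem.Chars.findFrom_natCast S p k hkn]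
    by_cases hf : PySem.Chars.find (S.drop k) p = -1
    · rw [if_pos hf]
      have hemp : (pvPositions S p).filter (fun i => decide ((k : Int) ≤ i)) = [] := by
        rw [List.filter_eq_nil_iff]
        intro i hi
        rcases mem_pvPositions.mp hi with ⟨h0, _, hsw⟩
        simp only [decide_eq_true_eq]
        intro hki
        have hinf : ¬ p <:+: S.drop k := (PySem.Chars.find_eq_neg_one_iff _ _).mp hf
        apply hinf
        have hpre : p <+: S.drop i.toNat := (PySem.Chars.startswith_iff _ _).mp hsw
        have hdd : S.drop i.toNat = (S.drop k).drop (i.toNat - k) := by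
          rw [List.drop_drop]
          congr 1
          omega
        have hex : ∃ j, p <+: (S.drop k).drop j := ⟨i.toNat - k, by rwa [← hdd]⟩
        exact (PySem.Chars.isIn_iff_infix _ _).mp
          ((PySem.Chars.exists_prefix_drop_iff_isIn _ _).mp hex)
      rw [hemp]
      rfl
    · rw [if_neg hf]
      have hr0 : 0 ≤ PySem.Chars.find (S.drop k) p := by
        have := PySem.Chars.neg_one_le_find (S.drop k) p
        omega
      set r := PySem.Chars.find (S.drop k) p with hrdef
      have hrlen : r ≤ ((S.drop k).length : Int) := PySem.Chars.find_le_length _ _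
      obtain ⟨hpre, hmin⟩ := PySem.Chars.find_spec hr0
      set x : Int := (k : Int) + r with hxdef
      have hdroplen : (S.drop k).length = S.length - k := List.length_drop
      have hxn : x.toNat ≤ S.length := by omega
      have hxnat : x.toNat = k + r.toNat := by omega
      have hxpre : p <+: S.drop x.toNat := by
        have hdd : S.drop x.toNat = (S.drop k).drop r.toNat := by
          rw [List.drop_drop, ← hxnat]
        rwa [hdd]
      have hxmem : x ∈ pvPositions S p := by
        rw [mem_pvPositions]
        refine ⟨by omega, ?_, (PySem.Chars.startswith_iff _ _).mpr hxpre⟩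
        have hl := hxpre.length_le
        rw [List.length_drop] at hl
        omega
      have hxmin : ∀ y ∈ pvPositions S p, (k : Int) ≤ y → x ≤ y := by
        intro y hy hky
        rcases Int.lt_or_le y x with hlt | hxy
        case inr => exact hxy
        rcases mem_pvPositions.mp hy with ⟨hy0, _, hysw⟩
        have hypre : p <+: S.drop y.toNat := (PySem.Chars.startswith_iff _ _).mp hysw
        exfalso
        apply hmin (y.toNat - k) (by omega)
        have hdd : (S.drop k).drop (y.toNat - k) = S.drop y.toNat := by
          rw [List.drop_drop]
          congr 1
          omega
        rwa [hdd]
      rw [filter_ge_eq_cons (pairwise_pvPositions S p) hxmem (by omega) hxmin]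
      rfl
  · have hk1 : k = S.length + 1 := by omega
    have hemp : (pvPositions S p).filter (fun i => decide ((k : Int) ≤ i)) = [] := by
      rw [List.filter_eq_nil_iff]
      intro i hi
      rcases mem_pvPositions.mp hi with ⟨h0, hlt, _⟩
      simp only [decide_eq_true_eq]
      have hp0 : (0 : Int) ≤ (p.length : Int) := by positivity
      omega
    rw [hemp]
    show PySem.Chars.findFrom S p (k : Int) none = -1
    rw [PySem.Chars.findFrom]
    have h1 : ¬ ((k : Int) < 0) := by omega
    simp only [h1, if_false]
    rw [if_pos (by omega : (S.length : Int) < (k : Int))]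

-- A's while-loop over findFrom equals the flagged runner over the remaining positions
lemma pvAWhile_eq (S p : List Char) (chrom : String) (plen : Int) (sign : String) (mh : Int) :
    ∀ (fuel k : Nat) (hits : List (String × Int × Int × String)) (count : Int),
      k ≤ S.length + 1 →
      ((pvPositions S p).filter (fun i => decide ((k : Int) ≤ i))).length ≤ fuel →
      pvAWhile S p chrom plen sign mh fuel hits count (PySem.Chars.findFrom S p (k : Int) none) =
        pvRun mh (((pvPositions S p).filter (fun i => decide ((k : Int) ≤ i))).map
          (fun i => (chrom, i + 1, i + plen, sign))) hits count := by
  intro fuel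
  induction fuel with
  | zero =>
      intro k hits count hk hlen
      have hemp : (pvPositions S p).filter (fun i => decide ((k : Int) ≤ i)) = [] :=
        List.eq_nil_of_length_eq_zero (by omega)
      rw [findFrom_pos S p k hk, hemp]
      simp [pvAWhile, pvRun]
  | succ fuel ih =>
      intro k hits count hk hlen
      rw [findFrom_pos S p k hk]
      cases hfilt : (pvPositions S p).filter (fun i => decide ((k : Int) ≤ i)) with
      | nil =>
          simp [pvAWhile, pvRun]
      | cons i rest =>
          have himem : i ∈ pvPositions S p ∧ (k : Int) ≤ i := by
            have hm : i ∈ (pvPositions S p).filter (fun i => decide ((k : Int) ≤ i)) := by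
              rw [hfilt]; exact List.mem_cons_self
            have := List.mem_filter.mp hm
            simpa using this
          rcases mem_pvPositions.mp himem.1 with ⟨hi0, hilt, _⟩
          have hp0 : (0 : Int) ≤ (p.length : Int) := by positivity
          have hmin : ∀ y ∈ pvPositions S p, (k : Int) ≤ y → i ≤ y := by
            intro y hy hky
            have hyf : y ∈ (pvPositions S p).filter (fun i => decide ((k : Int) ≤ i)) := by
              rw [List.mem_filter]
              exact ⟨hy, by simpa using hky⟩
            rw [hfilt] at hyf
            rcases List.mem_cons.mp hyf with rfl | hyt
            · exact le_rfl
            · have hpf := (pairwise_pvPositions S p).filter (fun i => decide ((k : Int) ≤ i))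
              rw [hfilt] at hpf
              have := (List.pairwise_cons.mp hpf).1 y hyt
              omega
          have hrest : rest = (pvPositions S p).filter (fun y => decide (i + 1 ≤ y)) := by
            have h := filter_ge_eq_cons (pairwise_pvPositions S p) himem.1 himem.2 hmin
            rw [hfilt] at h
            exact (List.cons.injEq _ _ _ _).mp h |>.2
          simp only [List.headD_cons, List.map_cons]
          rw [pvAWhile, if_neg (by omega : ¬ i = -1), pvRun]
          by_cases hstop : mh ≠ 0 ∧ mh ≤ count + 1
          · rw [if_pos hstop, if_pos hstop]
          · rw [if_neg hstop, if_neg hstop]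
            have hcast : i + 1 = ((i.toNat + 1 : Nat) : Int) := by omega
            rw [hcast, hrest]
            have hcast2 : (fun y => decide (i + 1 ≤ y)) =
                (fun y => decide (((i.toNat + 1 : Nat) : Int) ≤ y)) := by
              funext y
              rw [decide_eq_decide]
              omega
            rw [hcast2]
            apply ih
            · omega
            · have hlen2 : ((pvPositions S p).filter
                  (fun y => decide (((i.toNat + 1 : Nat) : Int) ≤ y))).length = rest.length := by
                rw [← hcast2, ← hrest]
              have hlen3 : ((pvPositions S p).filter
                  (fun i => decide ((k : Int) ≤ i))).length = rest.length + 1 := by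
                rw [hfilt]
                rfl
              omega

lemma pvPositions_length_le (S p : List Char) :
    (pvPositions S p).length ≤ S.length + 2 := by
  have h1 := List.length_filter_le
    (fun i => PySem.Chars.startswith (S.drop i.toNat) p)
    (PySem.List.pyRange 0 ((S.length : Int) - (p.length : Int) + 1) 1)
  have h2 := PySem.List.length_pyRange_one 0 ((S.length : Int) - (p.length : Int) + 1)
  unfold pvPositions
  omega

lemma filter_zero_le (S p : List Char) :
    (pvPositions S p).filter (fun i => decide ((0 : Int) ≤ i)) = pvPositions S p := by
  rw [List.filter_eq_self]
  intro a ha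
  simpa using (mem_pvPositions.mp ha).1

-- ===== VERDICT (by name: the statement is the Claim_ definition above) =====
theorem search_single_chrom_py_spec : Claim_equal_search_single_chrom_py := by
  intro primer rc plen chrom seq max_hits current_count _
  unfold Spec_search_single_chrom_py search_single_chrom_py search_single_chrom_py_alt
  simp only []
  set S := PySem.Chars.upper seq.toList with hS
  set l₁ := (pvPositions S primer.toList).map (fun i => (chrom, i + 1, i + plen, "+")) with hl1
  set l₂ := (pvPositions S rc.toList).map (fun i => (chrom, i + 1, i + plen, "-")) with hl2
  have hrw : ∀ (q : List Char) (sign : String) (hits : List (String × Int × Int × String)) (count : Int),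
      pvAWhile S q chrom plen sign max_hits (S.length + 2) hits count (PySem.Chars.find S q) =
        pvRun max_hits ((pvPositions S q).map (fun i => (chrom, i + 1, i + plen, sign))) hits count := by
    intro q sign hits count
    have hfind : PySem.Chars.find S q = PySem.Chars.findFrom S q ((0 : Nat) : Int) none := by
      rw [Nat.cast_zero, PySem.Chars.findFrom_zero]
    rw [hfind, pvAWhile_eq S q chrom plen sign max_hits (S.length + 2) 0 hits count (by omega)
      (by rw [Nat.cast_zero, filter_zero_le]; have := pvPositions_length_le S q; omega)]
    rw [Nat.cast_zero, filter_zero_le]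
  rw [hrw primer.toList "+", hrw rc.toList "-", ← hl1, ← hl2]
  have happ := pvRun_append max_hits l₁ l₂ [] current_count
  rw [← pvRun_proj max_hits (l₁ ++ l₂) [] current_count, happ]
  by_cases hflag : (pvRun max_hits l₁ [] current_count).2.2 = true
  · rw [if_pos hflag]
    simp only [if_pos hflag]
  · rw [if_neg hflag]
    simp only [if_neg hflag]
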